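-- pv_equiv track=rewrite | github.com/mair28/Vizion-Project | universal_website_analyzer.py | _validate_gtin_check_digit
-- ===== SOURCE A (Python) =====
-- def _validate_gtin_check_digit(code: str) -> bool:
--     """Validate GTIN check digit using the standard algorithm"""
--     try:
--         # Convert to list of integers
--         digits = [int(d) for d in code]
--
--         # Calculate check digit using GTIN algorithm
--         check_sum = 0
--
--         # For GTIN, we start from the rightmost digit (excluding check digit)
--         # and alternate weights 3 and 1 from right to left
--         for i in range(len(digits) - 1):
--             position_from_right = len(digits) - 2 - i  # Position from right (0-based)
--             weight = 3 if position_from_right % 2 == 0 else 1  # Odd positions get weight 3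
--             check_sum += digits[i] * weight
--
--         # Calculate the check digit
--         calculated_check = (10 - (check_sum % 10)) % 10
--
--         # Compare with the actual check digit
--         return calculated_check == digits[-1]
--     except (ValueError, IndexError):
--         return False
-- ===== SOURCE B (Python) =====
-- def _pair_sum(rev):
--     """Weighted sum of the payload read right-to-left, consumed two digits at a
--     time: the first of each pair weighs 3, the second weighs 1."""
--     total = 0
--     while rev:
--         if len(rev) == 1:
--             return total + 3 * rev[0]
--         total += 3 * rev[0] + rev[1]
--         rev = rev[2:]
--     return total
--
--
-- def _validate_gtin_check_digit(code: str) -> bool: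
--     """Validate GTIN check digit: recompute it from the payload digits taken
--     right-to-left in pairs (weights 3,1,3,1,...) and compare with the last digit."""
--     try:
--         digits = [int(d) for d in code]
--         check = digits[-1]
--         payload = digits[:-1][::-1]
--         return (10 - _pair_sum(payload) % 10) % 10 == check
--     except (ValueError, IndexError):
--         return False
-- ===== Notes on version B (the rewrite author's own statement) =====
-- stated objective: alternative
-- what changed: Replaces A's indexed loop with per-element position-from-right and parity-weight arithmetic by reversing the payload once (digits[:-1][::-1]) and summing it with a pairwise recursion that consumes two digits per step (weight 3 then 1), so no positions or weights are ever computed.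
import Mathlib
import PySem

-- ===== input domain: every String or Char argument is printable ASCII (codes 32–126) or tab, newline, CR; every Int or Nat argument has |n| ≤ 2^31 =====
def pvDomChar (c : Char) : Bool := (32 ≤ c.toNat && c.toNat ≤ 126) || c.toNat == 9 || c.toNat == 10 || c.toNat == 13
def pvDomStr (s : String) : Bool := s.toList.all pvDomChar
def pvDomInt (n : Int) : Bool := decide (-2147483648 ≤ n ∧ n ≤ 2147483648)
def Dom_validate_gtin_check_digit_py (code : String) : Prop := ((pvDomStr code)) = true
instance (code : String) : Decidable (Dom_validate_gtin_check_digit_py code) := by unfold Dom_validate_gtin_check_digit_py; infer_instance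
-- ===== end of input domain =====

-- B replaces A's indexed loop with position-from-right weight arithmetic by a pairwise
-- recursion over the reversed payload (two digits per step, weights 3 then 1); alternative
-- decomposition, same cost.

-- ===== PORT A =====
def validate_gtin_check_digit_py (code : String) : Bool :=
  -- digits = [int(d) for d in code]  (int on a non-digit char raises ValueError → none)
  match code.toList.mapM (fun d => PySem.Int.ofChars? [d]) with
  | none => false                     -- except ValueError: return False
  | some digits =>
    let check_sum : Int :=
      (PySem.List.pyRange 0 ((digits.length : Int) - 1) 1).foldl
        (fun acc i =>
          let position_from_right := (digits.length : Int) - 2 - i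
          let weight : Int := if PySem.Int.mod position_from_right 2 = 0 then 3 else 1
          acc + PySem.List.pyGetD digits i 0 * weight) 0
    let calculated_check := PySem.Int.mod (10 - PySem.Int.mod check_sum 10) 10
    match PySem.List.pyGet? digits (-1) with
    | none => false                   -- except IndexError (empty input): return False
    | some last => decide (calculated_check = last)

-- ===== PORT B =====
/-- The while loop of `_pair_sum`: state `total`, the list consumed two digits
per iteration (a lone final digit weighs 3 and returns at once). -/
def pair_sum_go (total : Int) : List Int → Int
  | [] => total
  | [a] => total + 3 * a
  | a :: b :: rest => pair_sum_go (total + (3 * a + b)) rest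

/-- `_pair_sum(rev)`: weighted sum of the payload read right-to-left in pairs. -/
def pair_sum (rev : List Int) : Int := pair_sum_go 0 rev

def validate_gtin_check_digit_py_alt (code : String) : Bool :=
  match code.toList.mapM (fun d => PySem.Int.ofChars? [d]) with
  | none => false                     -- except ValueError: return False
  | some digits =>
    match PySem.List.pyGet? digits (-1) with   -- check = digits[-1]
    | none => false                   -- except IndexError (empty input): return False
    | some check =>
      -- payload = digits[:-1][::-1]   (slice with step -1 never raises: getD is safe)
      let payload :=
        (PySem.List.slice? (PySem.List.slice digits none (some (-1))) none none (-1)).getD []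
      decide (PySem.Int.mod (10 - PySem.Int.mod (pair_sum payload) 10) 10 = check)

-- ===== PRECONDITION & SPEC =====
def Spec_validate_gtin_check_digit_py (code : String) (out : Bool) : Prop := out = validate_gtin_check_digit_py_alt code
instance (code : String) (out : Bool) : Decidable (Spec_validate_gtin_check_digit_py code out) := by unfold Spec_validate_gtin_check_digit_py; infer_instance

-- ===== CLAIM (what is proved, stated in full; the proofs are below) =====
def Claim_equal_validate_gtin_check_digit_py : Prop := ∀ (code : String), Dom_validate_gtin_check_digit_py code → Spec_validate_gtin_check_digit_py code (validate_gtin_check_digit_py code)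

-- ===== LEMMAS AND PROOFS =====

/-- The loop accumulates the 3,1,3,1,… weighted sum over positions. -/
theorem pair_sum_go_eq (total : Int) (l : List Int) :
    pair_sum_go total l = total + ∑ j ∈ Finset.range l.length,
      (if j % 2 = 0 then (3 : Int) else 1) * l.getD j 0 := by
  induction total, l using pair_sum_go.induct with
  | case1 total => simp [pair_sum_go]
  | case2 total a => simp [pair_sum_go]
  | case3 total a b rest ih =>
    rw [pair_sum_go, ih]
    have hlen2 : (a :: b :: rest).length = rest.length + 1 + 1 := rfl
    rw [hlen2, Finset.sum_range_succ', Finset.sum_range_succ']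
    have h2 : ∀ j, (a :: b :: rest).getD (j + 1 + 1) 0 = rest.getD j 0 := by
      intro j; rfl
    have h3 : ∀ j : Nat, (j + 1 + 1) % 2 = j % 2 := by intro j; omega
    simp only [h2, h3]
    have : (1 : Nat) % 2 = 1 := rfl
    simp [this]
    ring

/-- The weight A computes from `position_from_right` as an `Int` is the Nat-parity weight. -/
theorem weight_cast (n i : Nat) (h : i + 1 < n) :
    (if PySem.Int.mod ((n : Int) - 2 - (i : Int)) 2 = 0 then (3 : Int) else 1)
      = (if (n - 2 - i) % 2 = 0 then (3 : Int) else 1) := by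
  rw [PySem.Int.mod_eq_emod_of_pos (by norm_num)]
  split_ifs with h1 h2 <;> first | rfl | omega

theorem listsum (F : Nat → Int) (n : Nat) :
    ((List.range n).map F).sum = ∑ i ∈ Finset.range n, F i := rfl

/-- A's foldl checksum equals `pair_sum` of the reversed payload. -/
theorem check_sum_eq_pair_sum (digits : List Int) (hne : digits ≠ []) :
    (PySem.List.pyRange 0 ((digits.length : Int) - 1) 1).foldl
        (fun acc i =>
          acc + PySem.List.pyGetD digits i 0 *
            (if PySem.Int.mod ((digits.length : Int) - 2 - i) 2 = 0 then (3 : Int) else 1)) 0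
      = pair_sum digits.dropLast.reverse := by
  have hn : 0 < digits.length := List.length_pos_iff.2 hne
  rw [PySem.List.foldl_add, zero_add]
  have h1 : ((digits.length : Int) - 1) = ((digits.length - 1 : Nat) : Int) := by omega
  rw [h1, PySem.List.pyRange_zero_natCast, List.map_map, listsum]
  rw [pair_sum, pair_sum_go_eq, zero_add]
  have hlen : digits.dropLast.reverse.length = digits.length - 1 := by
    simp
  rw [hlen]
  rw [← Finset.sum_range_reflect]
  apply Finset.sum_congr rfl
  intro i hi
  have hi' := Finset.mem_range.1 hi
  have hidx : digits.length - 1 - 1 - i + 1 < digits.length := by omega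
  simp only [Function.comp_apply, PySem.List.pyGetD_natCast]
  rw [weight_cast _ _ hidx]
  have e1 : digits.length - 2 - (digits.length - 1 - 1 - i) = i := by omega
  rw [e1]
  have hget : digits.dropLast.reverse.getD i 0
      = digits.getD (digits.length - 1 - 1 - i) 0 := by
    have hlt : i < digits.dropLast.reverse.length := by rw [hlen]; omega
    rw [List.getD_eq_getElem _ _ hlt, List.getElem_reverse, List.getElem_dropLast,
        List.getD_eq_getElem _ _ (by omega)]
    congr 1
    simp only [List.length_dropLast]
  rw [hget, mul_comm]

-- ===== VERDICT (by name: the statement is the Claim_ definition above) =====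
theorem validate_gtin_check_digit_py_spec : Claim_equal_validate_gtin_check_digit_py := by
  intro code _
  unfold Spec_validate_gtin_check_digit_py validate_gtin_check_digit_py validate_gtin_check_digit_py_alt
  cases hm : code.toList.mapM (fun d => PySem.Int.ofChars? [d]) with
  | none => rfl
  | some digits =>
    cases hg : PySem.List.pyGet? digits (-1) with
    | none => simp only [hg]
    | some check =>
      have hne : digits ≠ [] := by
        intro h; rw [h] at hg; cases hg
      simp only [hg, PySem.List.slice_to_neg_one, PySem.List.slice?_none_none_neg_one,
        Option.getD_some]
      rw [check_sum_eq_pair_sum digits hne]
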